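-- pv_equiv track=rewrite | github.com/arjunrajlaboratory/ProbeDesign | oligo_probe_design/core/probe_design.py | mask_runs
-- ===== SOURCE A (Python) =====
-- def mask_runs(inseq, the_char, run_length, mismatches):
--     """Mask runs of a specific character in sequence.
--
--     Args:
--         inseq: Input sequence
--         the_char: Character to look for runs of
--         run_length: Minimum length of run to mask
--         mismatches: Number of allowed mismatches in run
--
--     Returns:
--         Binary mask array (1 = masked, 0 = unmasked)
--     """
--     outseq = [0] * len(inseq)
--     for i in range(len(inseq) - run_length + 1):
--         count = 0
--         for j in range(i, i + run_length):
--             if inseq[j] == the_char: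
--                 count += 1
--         if count >= run_length - mismatches:
--             outseq[i:i + run_length] = [1] * run_length
--
--     return outseq
-- ===== SOURCE B (Python) =====
-- def mask_runs(inseq, the_char, run_length, mismatches):
--     """Mask runs of the_char: O(n) sliding-window count plus a coverage
--     pointer so every position is written at most once."""
--     n = len(inseq)
--     out = [0] * n
--     if run_length <= 0 or run_length > n:
--         return out
--     thr = run_length - mismatches
--     count = sum(1 for c in inseq[:run_length] if c == the_char)
--     end = 0
--     for i in range(n - run_length + 1):
--         if i > 0:
--             count += (inseq[i + run_length - 1] == the_char) - (inseq[i - 1] == the_char)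
--         if count >= thr:
--             for j in range(max(i, end), i + run_length):
--                 out[j] = 1
--             end = i + run_length
--     return out
-- ===== Notes on version B (the rewrite author's own statement) =====
-- stated objective: faster
-- what changed: Replaces A's per-window rescan (count each window from scratch) and repeated slice rewrites by a single pass with an incremental sliding-window count updated at the two endpoints plus a coverage pointer so each output position is written at most once.
-- intended difference: For run_length < 0 with run_length <= mismatches and len(inseq) + run_length >= 1, A's slice stop i+run_length is negative, wraps to the end and deletes elements so A returns a mask shorter than the input; B returns the intended all-zero mask of full length. — e.g. on mask_runs("aa", "a", -1, 0): A returns [0], B returns [0, 0]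
import Mathlib
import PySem

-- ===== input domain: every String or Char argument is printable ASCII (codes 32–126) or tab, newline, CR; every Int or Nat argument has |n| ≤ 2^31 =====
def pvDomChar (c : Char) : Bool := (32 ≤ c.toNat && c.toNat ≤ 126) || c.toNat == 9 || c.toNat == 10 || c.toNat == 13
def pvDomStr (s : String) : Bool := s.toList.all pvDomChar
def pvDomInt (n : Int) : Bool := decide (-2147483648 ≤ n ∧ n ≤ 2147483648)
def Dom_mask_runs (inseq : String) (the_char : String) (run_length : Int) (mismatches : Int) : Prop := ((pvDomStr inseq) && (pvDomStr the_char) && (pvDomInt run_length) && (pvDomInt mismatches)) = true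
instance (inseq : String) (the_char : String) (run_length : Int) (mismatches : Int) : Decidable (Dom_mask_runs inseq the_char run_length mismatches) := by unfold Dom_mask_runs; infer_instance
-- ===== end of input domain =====

-- B replaces A's per-window rescan and slice re-write by one O(n) pass: a sliding match
-- count updated at the two window endpoints plus a coverage pointer so each position is
-- written at most once.  Equivalence is proved outside D_mask_runs (negative run_length,
-- where A's negative slice stop wraps around and deletes part of the output).

-- ===== PORT A =====
-- Python step-1 slice assignment 'xs[a:b] = repl' (exact: both bounds resolved by Python's
-- slice-index rule — negative from the end, then clamped — and stop floored at start).
def pyAssignSlice (xs : List Int) (a b : Int) (repl : List Int) : List Int :=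
  let a' := PySem.List.clampIdx xs.length a
  let b' := max a' (PySem.List.clampIdx xs.length b)
  xs.take a' ++ repl ++ xs.drop b'

def mask_runs (inseq : String) (the_char : String) (run_length : Int) (mismatches : Int) : List Int :=
  let cs := inseq.toList
  let outseq : List Int := List.replicate cs.length 0
  (PySem.List.pyRange 0 (PySem.List.len cs - run_length + 1) 1).foldl
    (fun outseq i =>
      -- inner count loop; cs[j] is only evaluated with j in range (pyGetD is exact there)
      let count : Int := (PySem.List.pyRange i (i + run_length) 1).foldl
        (fun count j =>
          if [PySem.List.pyGetD cs j ' '] = the_char.toList then count + 1 else count) 0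
      if run_length - mismatches ≤ count then
        pyAssignSlice outseq i (i + run_length) (List.replicate run_length.toNat 1)
      else outseq)
    outseq

-- ===== PORT B =====
def mask_runs_alt (inseq : String) (the_char : String) (run_length : Int) (mismatches : Int) : List Int :=
  let cs := inseq.toList
  let n : Int := PySem.List.len cs
  let out : List Int := List.replicate cs.length 0
  if run_length ≤ 0 ∨ n < run_length then out
  else
    let thr := run_length - mismatches
    let count0 : Int :=
      ((PySem.List.slice cs none (some run_length)).countP (fun c => decide ([c] = the_char.toList)) : Nat)
    let st := (PySem.List.pyRange 0 (n - run_length + 1) 1).foldl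
      (fun (st : List Int × Int × Int) i =>
        let out := st.1
        let count : Int :=
          if 0 < i then
            st.2.1 + (if [PySem.List.pyGetD cs (i + run_length - 1) ' '] = the_char.toList then 1 else 0)
                   - (if [PySem.List.pyGetD cs (i - 1) ' '] = the_char.toList then 1 else 0)
          else st.2.1
        let e := st.2.2
        if thr ≤ count then
          ((PySem.List.pyRange (max i e) (i + run_length) 1).foldl
              (fun out j => PySem.List.pySetD out j 1) out,
           count, i + run_length)
        else (out, count, e))
      (out, count0, 0)
    st.1

-- ===== PRECONDITION & SPEC =====
-- For run_length < 0 with run_length ≤ mismatches and len(inseq) + run_length ≥ 1, A's slice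
-- stop i+run_length is negative, wraps to the end of the list and DELETES elements, so A
-- returns a mask shorter than the input; B returns the intended all-zero mask of full length.
def D_mask_runs (inseq : String) (the_char : String) (run_length : Int) (mismatches : Int) : Prop :=
  run_length < 0 ∧ run_length ≤ mismatches ∧ 1 ≤ (inseq.toList.length : Int) + run_length
instance (inseq : String) (the_char : String) (run_length : Int) (mismatches : Int) : Decidable (D_mask_runs inseq the_char run_length mismatches) := by unfold D_mask_runs; infer_instance

def Spec_mask_runs (inseq : String) (the_char : String) (run_length : Int) (mismatches : Int) (out : List Int) : Prop := ¬ D_mask_runs inseq the_char run_length mismatches → out = mask_runs_alt inseq the_char run_length mismatches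
instance (inseq : String) (the_char : String) (run_length : Int) (mismatches : Int) (out : List Int) : Decidable (Spec_mask_runs inseq the_char run_length mismatches out) := by unfold Spec_mask_runs; infer_instance

def pvDiffWitness_mask_runs : String × String × Int × Int := ("aa", "a", -1, 0)
def pvDiffWitnessOut_mask_runs : (List Int) × (List Int) := ([0], [0, 0])

-- ===== CLAIM (what is proved, stated in full; the proofs are below) =====
def Claim_unchanged_mask_runs : Prop := ∀ (inseq : String) (the_char : String) (run_length : Int) (mismatches : Int), Dom_mask_runs inseq the_char run_length mismatches → Spec_mask_runs inseq the_char run_length mismatches (mask_runs inseq the_char run_length mismatches)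
def Claim_changed_mask_runs : Prop := Dom_mask_runs (pvDiffWitness_mask_runs.1) (pvDiffWitness_mask_runs.2.1) (pvDiffWitness_mask_runs.2.2.1) (pvDiffWitness_mask_runs.2.2.2) ∧ D_mask_runs (pvDiffWitness_mask_runs.1) (pvDiffWitness_mask_runs.2.1) (pvDiffWitness_mask_runs.2.2.1) (pvDiffWitness_mask_runs.2.2.2) ∧ mask_runs (pvDiffWitness_mask_runs.1) (pvDiffWitness_mask_runs.2.1) (pvDiffWitness_mask_runs.2.2.1) (pvDiffWitness_mask_runs.2.2.2) = pvDiffWitnessOut_mask_runs.1 ∧ mask_runs_alt (pvDiffWitness_mask_runs.1) (pvDiffWitness_mask_runs.2.1) (pvDiffWitness_mask_runs.2.2.1) (pvDiffWitness_mask_runs.2.2.2) = pvDiffWitnessOut_mask_runs.2 ∧ pvDiffWitnessOut_mask_runs.1 ≠ pvDiffWitnessOut_mask_runs.2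
def Claim_exact_mask_runs : Prop := ∀ (inseq : String) (the_char : String) (run_length : Int) (mismatches : Int), Dom_mask_runs inseq the_char run_length mismatches → D_mask_runs inseq the_char run_length mismatches → mask_runs inseq the_char run_length mismatches ≠ mask_runs_alt inseq the_char run_length mismatches

-- ===== LEMMAS AND PROOFS =====

-- Proof-side vocabulary: match predicate, window count, qualifying window, coverage, mask.
def pMatch (tc : List Char) (c : Char) : Bool := decide ([c] = tc)

def cntW (cs tc : List Char) (R i : Nat) : Nat := ((cs.drop i).take R).countP (pMatch tc)

def qualB (cs tc : List Char) (R : Nat) (thr : Int) (i : Nat) : Bool :=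
  decide (thr ≤ (cntW cs tc R i : Int))

def covB (cs tc : List Char) (R : Nat) (thr : Int) (t j : Nat) : Bool :=
  (List.range t).any fun i => decide (i ≤ j) && decide (j < i + R) && qualB cs tc R thr i

def maskAt (cs tc : List Char) (R : Nat) (thr : Int) (t : Nat) : List Int :=
  (List.range cs.length).map fun j => if covB cs tc R thr t j then 1 else 0

-- The two loop bodies, named so the fold lemmas can speak about them (definitionally the
-- lambdas of the ports).
def bodyA (cs tc : List Char) (run_length mismatches : Int) (outseq : List Int) (i : Int) : List Int :=
  let count : Int := (PySem.List.pyRange i (i + run_length) 1).foldl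
    (fun count j =>
      if [PySem.List.pyGetD cs j ' '] = tc then count + 1 else count) 0
  if run_length - mismatches ≤ count then
    pyAssignSlice outseq i (i + run_length) (List.replicate run_length.toNat 1)
  else outseq

def bodyB (cs tc : List Char) (run_length mismatches : Int)
    (st : List Int × Int × Int) (i : Int) : List Int × Int × Int :=
  let out := st.1
  let count : Int :=
    if 0 < i then
      st.2.1 + (if [PySem.List.pyGetD cs (i + run_length - 1) ' '] = tc then 1 else 0)
             - (if [PySem.List.pyGetD cs (i - 1) ' '] = tc then 1 else 0)
    else st.2.1
  let e := st.2.2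
  if run_length - mismatches ≤ count then
    ((PySem.List.pyRange (max i e) (i + run_length) 1).foldl
        (fun out j => PySem.List.pySetD out j 1) out,
     count, i + run_length)
  else (out, count, e)

lemma mask_runs_eq (inseq the_char : String) (r m : Int) :
    mask_runs inseq the_char r m =
      (PySem.List.pyRange 0 (PySem.List.len inseq.toList - r + 1) 1).foldl
        (bodyA inseq.toList the_char.toList r m)
        (List.replicate inseq.toList.length 0) := rfl

lemma mask_runs_alt_eq (inseq the_char : String) (r m : Int) :
    mask_runs_alt inseq the_char r m =
      (if r ≤ 0 ∨ PySem.List.len inseq.toList < r then List.replicate inseq.toList.length (0 : Int)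
       else
        ((PySem.List.pyRange 0 (PySem.List.len inseq.toList - r + 1) 1).foldl
          (bodyB inseq.toList the_char.toList r m)
          (List.replicate inseq.toList.length 0,
           ((PySem.List.slice inseq.toList none (some r)).countP
              (fun c => decide ([c] = the_char.toList)) : Nat), 0)).1) := rfl

lemma covB_zero (cs tc : List Char) (R : Nat) (thr : Int) (j : Nat) :
    covB cs tc R thr 0 j = false := by
  simp [covB]

lemma covB_succ (cs tc : List Char) (R : Nat) (thr : Int) (t j : Nat) :
    covB cs tc R thr (t + 1) j
      = (covB cs tc R thr t j || (decide (t ≤ j) && decide (j < t + R) && qualB cs tc R thr t)) := by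
  simp [covB, List.range_succ]

lemma maskAt_zero (cs tc : List Char) (R : Nat) (thr : Int) :
    maskAt cs tc R thr 0 = List.replicate cs.length 0 := by
  simp [maskAt, covB_zero, List.map_const']

lemma length_maskAt (cs tc : List Char) (R : Nat) (thr : Int) (t : Nat) :
    (maskAt cs tc R thr t).length = cs.length := by
  simp [maskAt]

lemma window_map (cs : List Char) (d : Char) (t R : Nat) (h : t + R ≤ cs.length) :
    (PySem.List.pyRange (t : Int) ((t : Int) + (R : Int)) 1).map
        (fun j => PySem.List.pyGetD cs j d)
      = (cs.drop t).take R := by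
  apply List.ext_getElem
  · simp [PySem.List.length_pyRange_one]
    omega
  · intro k h1 h2
    simp only [List.getElem_map, PySem.List.getElem_pyRange_one, List.getElem_take,
      List.getElem_drop]
    have hk : k < R := by
      simpa [PySem.List.length_pyRange_one] using h1
    rw [PySem.List.pyGetD_eq_getElem cs d (by positivity) (by omega)]
    congr 1

lemma countA_eq (cs tc : List Char) (t R : Nat) (h : t + R ≤ cs.length) :
    ((PySem.List.pyRange (t : Int) ((t : Int) + (R : Int)) 1).foldl
        (fun count j => if [PySem.List.pyGetD cs j ' '] = tc then count + 1 else count) 0)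
      = (cntW cs tc R t : Int) := by
  rw [PySem.List.foldl_ite_add_one (fun j => [PySem.List.pyGetD cs j ' '] = tc)]
  have : (List.countP (fun j => decide ([PySem.List.pyGetD cs j ' '] = tc))
        (PySem.List.pyRange (t : Int) ((t : Int) + (R : Int)) 1))
      = List.countP (pMatch tc)
        ((PySem.List.pyRange (t : Int) ((t : Int) + (R : Int)) 1).map
          (fun j => PySem.List.pyGetD cs j ' ')) := by
    rw [List.countP_map]
    rfl
  rw [this, window_map cs ' ' t R h]
  simp [cntW]

lemma overwrite_ones (f : Nat → Int) (n a b : Nat) (hab : a ≤ b) (hbn : b ≤ n) :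
    ((List.range n).map f).take a ++ (List.replicate (b - a) (1 : Int) ++ ((List.range n).map f).drop b)
      = (List.range n).map fun j => if a ≤ j ∧ j < b then (1 : Int) else f j := by
  apply List.ext_getElem
  · simp; omega
  · intro k h1 h2
    simp only [List.getElem_append, List.length_take, List.length_map, List.length_range,
      List.getElem_take, List.getElem_map, List.getElem_range, List.length_replicate,
      List.getElem_replicate, List.getElem_drop]
    split_ifs <;> first | rfl | omega | (congr 1; omega)

lemma pySetD_map_range (f : Nat → Int) (n b : Nat) (h : b < n) :
    PySem.List.pySetD ((List.range n).map f) (b : Int) 1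
      = (List.range n).map fun j => if j = b then (1 : Int) else f j := by
  apply List.ext_getElem
  · simp
  · intro k h1 h2
    have hk : k < n := by simpa using h2
    have := PySem.List.pyGetD_pySetD_natCast ((List.range n).map f) b k (1 : Int) 0 (by simpa using h)
    rw [PySem.List.pyGetD_eq_getElem _ _ (by positivity)
      (by simpa [PySem.List.length_pySetD] using (Int.ofNat_lt.mpr h1))] at this
    rw [PySem.List.pyGetD_eq_getElem _ _ (by positivity) (by simpa using (Int.ofNat_lt.mpr hk))] at this
    simp only [Int.toNat_natCast] at this
    simp only [this, List.getElem_map, List.getElem_range]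

lemma mark_ones (f : Nat → Int) (n a b : Nat) (hbn : b ≤ n) :
    (PySem.List.pyRange (a : Int) (b : Int) 1).foldl
        (fun out j => PySem.List.pySetD out j 1) ((List.range n).map f)
      = (List.range n).map fun j => if a ≤ j ∧ j < b then (1 : Int) else f j := by
  induction b with
  | zero =>
      rw [PySem.List.pyRange_one_eq_nil (by positivity)]
      simp
  | succ b ih =>
      by_cases hab : a ≤ b
      · have hsplit : PySem.List.pyRange (a : Int) ((b + 1 : Nat) : Int) 1
            = PySem.List.pyRange (a : Int) (b : Int) 1 ++ [(b : Int)] := by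
          push_cast
          exact PySem.List.pyRange_one_succ_right (by exact_mod_cast hab)
        rw [hsplit, List.foldl_append, ih (by omega)]
        simp only [List.foldl_cons, List.foldl_nil]
        rw [pySetD_map_range _ n b (by omega)]
        apply List.map_congr_left
        intro j hj
        have : j < n := List.mem_range.mp hj
        split_ifs <;> first | rfl | omega
      · rw [PySem.List.pyRange_one_eq_nil (by exact_mod_cast Nat.succ_le_of_lt (by omega))]
        simp only [List.foldl_nil]
        apply List.map_congr_left
        intro j hj
        split_ifs <;> first | rfl | omega

lemma cnt_slide (cs tc : List Char) (t R : Nat) (hR : 1 ≤ R) (ht : 1 ≤ t)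
    (h : t + R ≤ cs.length) :
    cntW cs tc R t + (if pMatch tc (cs.getD (t - 1) ' ') then 1 else 0)
      = cntW cs tc R (t - 1) + (if pMatch tc (cs.getD (t + R - 1) ' ') then 1 else 0) := by
  have h1 : t - 1 < cs.length := by omega
  have h2 : t + R - 1 < cs.length := by omega
  have hd1 : cs.drop (t - 1) = cs[t-1] :: cs.drop t := by
    rw [List.drop_eq_getElem_cons h1, Nat.sub_add_cancel ht]
  have hgetD1 : cs.getD (t - 1) ' ' = cs[t-1] := List.getD_eq_getElem cs ' ' h1
  have hgetD2 : cs.getD (t + R - 1) ' ' = cs[t+R-1] := List.getD_eq_getElem cs ' ' h2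
  have htake : (cs.drop t).take R = (cs.drop t).take (R - 1) ++ [cs[t + R - 1]] := by
    have hlen : R - 1 < (cs.drop t).length := by simp; omega
    conv_lhs => rw [show R = (R - 1) + 1 from by omega]
    rw [List.take_add_one, List.getElem?_eq_getElem hlen]
    simp only [Option.toList_some]
    congr 2
    rw [List.getElem_drop]
    congr 1
    omega
  have htake2 : (cs.drop (t-1)).take R = cs[t-1] :: (cs.drop t).take (R - 1) := by
    rw [hd1, show R = (R - 1) + 1 by omega, List.take_succ_cons]
    simp
  simp only [cntW]
  rw [hgetD1, hgetD2, htake, htake2]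
  simp only [List.countP_append, List.countP_cons, List.countP_nil]
  by_cases b1 : pMatch tc cs[t-1] <;> by_cases b2 : pMatch tc cs[t+R-1] <;> simp [b1, b2]

lemma stepA (cs tc : List Char) (m : Int) (t R : Nat) (hR : 1 ≤ R) (ht : t + R ≤ cs.length) :
    bodyA cs tc (R : Int) m (maskAt cs tc R ((R : Int) - m) t) (t : Int)
      = maskAt cs tc R ((R : Int) - m) (t + 1) := by
  have hcnt := countA_eq cs tc t R ht
  simp only [bodyA, hcnt]
  by_cases hq : ((R : Int) - m) ≤ (cntW cs tc R t : Int)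
  · rw [if_pos hq]
    simp only [pyAssignSlice, length_maskAt]
    have hc1 : PySem.List.clampIdx cs.length (t : Int) = t := by
      rw [PySem.List.clampIdx_natCast]; omega
    have hcast : (t : Int) + (R : Int) = ((t + R : Nat) : Int) := by push_cast; ring
    have hc2 : PySem.List.clampIdx cs.length ((t : Int) + (R : Int)) = t + R := by
      rw [hcast, PySem.List.clampIdx_natCast]; omega
    rw [hc1, hc2, Nat.max_eq_right (by omega)]
    have hrep : ((R : Int)).toNat = R := Int.toNat_natCast R
    rw [hrep]
    simp only [maskAt, List.append_assoc]
    have hover := overwrite_ones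
      (fun j => if covB cs tc R ((R : Int) - m) t j = true then (1 : Int) else 0)
      cs.length t (t + R) (by omega) (by omega)
    rw [show (t + R) - t = R from by omega] at hover
    rw [hover]
    apply List.map_congr_left
    intro j hj
    rw [covB_succ]
    have hqt : qualB cs tc R ((R : Int) - m) t = true := by
      simp [qualB]; omega
    simp only [hqt, Bool.and_true]
    by_cases hc : covB cs tc R ((R : Int) - m) t j = true
    · simp only [hc, Bool.true_or, if_true]
      split_ifs with hw
      · rfl
      · rfl
    · simp only [Bool.not_eq_true] at hc
      simp only [hc, Bool.false_or]
      by_cases hw : t ≤ j ∧ j < t + R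
      · rw [if_pos hw]
        simp [hw.1, hw.2]
      · rw [if_neg hw]
        have : (decide (t ≤ j) && decide (j < t + R)) = false := by
          simp only [Bool.and_eq_false_iff, decide_eq_false_iff_not]
          omega
        simp [this]
  · rw [if_neg hq]
    simp only [maskAt]
    apply List.map_congr_left
    intro j hj
    rw [covB_succ]
    have hqt : qualB cs tc R ((R : Int) - m) t = false := by
      simp [qualB]; omega
    simp [hqt]

lemma A_loop (cs tc : List Char) (m : Int) (R : Nat) (hR : 1 ≤ R) :
    ∀ t : Nat, t + R ≤ cs.length + 1 →
      (PySem.List.pyRange 0 (t : Int) 1).foldl (bodyA cs tc (R : Int) m)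
          (maskAt cs tc R ((R : Int) - m) 0)
        = maskAt cs tc R ((R : Int) - m) t := by
  intro t
  induction t with
  | zero =>
      intro _
      rw [show ((0 : Nat) : Int) = 0 from rfl, PySem.List.pyRange_one_eq_nil le_rfl]
      rfl
  | succ t ih =>
      intro h
      have hsplit : PySem.List.pyRange 0 ((t + 1 : Nat) : Int) 1
          = PySem.List.pyRange 0 (t : Int) 1 ++ [(t : Int)] := by
        push_cast
        exact PySem.List.pyRange_one_succ_right (by positivity)
      rw [hsplit, List.foldl_append, ih (by omega)]
      simp only [List.foldl_cons, List.foldl_nil]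
      exact stepA cs tc m t R hR (by omega)

lemma stepB (cs tc : List Char) (m : Int) (t R : Nat) (hR : 1 ≤ R) (ht : t + R ≤ cs.length)
    (e : Int) (he0 : 0 ≤ e) (he1 : e ≤ (t : Int) - 1 + R)
    (hcov : ∀ j : Nat, t ≤ j → (j : Int) < e → covB cs tc R ((R : Int) - m) t j = true)
    (hbnd : ∀ j : Nat, covB cs tc R ((R : Int) - m) t j = true → (j : Int) < e) :
    ∃ e' : Int, 0 ≤ e' ∧ e' ≤ ((t + 1 : Nat) : Int) - 1 + R ∧
      (∀ j : Nat, t + 1 ≤ j → (j : Int) < e' → covB cs tc R ((R : Int) - m) (t + 1) j = true) ∧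
      (∀ j : Nat, covB cs tc R ((R : Int) - m) (t + 1) j = true → (j : Int) < e') ∧
      bodyB cs tc (R : Int) m
          (maskAt cs tc R ((R : Int) - m) t, (cntW cs tc R (t - 1) : Int), e) (t : Int)
        = (maskAt cs tc R ((R : Int) - m) (t + 1), (cntW cs tc R t : Int), e') := by
  have hcount :
      (if 0 < (t : Int) then
        (cntW cs tc R (t - 1) : Int)
          + (if [PySem.List.pyGetD cs ((t : Int) + (R : Int) - 1) ' '] = tc then 1 else 0)
          - (if [PySem.List.pyGetD cs ((t : Int) - 1) ' '] = tc then 1 else 0)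
      else (cntW cs tc R (t - 1) : Int)) = (cntW cs tc R t : Int) := by
    by_cases ht0 : 0 < t
    · rw [if_pos (by exact_mod_cast ht0)]
      have hs := cnt_slide cs tc t R hR ht0 ht
      have hg1 : PySem.List.pyGetD cs ((t : Int) - 1) ' ' = cs.getD (t - 1) ' ' := by
        rw [show ((t : Int) - 1) = ((t - 1 : Nat) : Int) from by omega, PySem.List.pyGetD_natCast]
      have hg2 : PySem.List.pyGetD cs ((t : Int) + (R : Int) - 1) ' '
          = cs.getD (t + R - 1) ' ' := by
        rw [show ((t : Int) + (R : Int) - 1) = ((t + R - 1 : Nat) : Int) from by omega,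
          PySem.List.pyGetD_natCast]
      rw [hg1, hg2]
      simp only [pMatch, decide_eq_true_eq] at hs
      split_ifs at hs ⊢ <;> omega
    · rw [if_neg (by exact_mod_cast ht0)]
      have : t = 0 := by omega
      subst this
      rfl
  by_cases hq : ((R : Int) - m) ≤ (cntW cs tc R t : Int)
  · have hqt : qualB cs tc R ((R : Int) - m) t = true := by simp [qualB]; omega
    refine ⟨(t : Int) + R, by positivity, by push_cast; omega, ?_, ?_, ?_⟩
    · intro j hj1 hj2
      rw [covB_succ]
      have hw : (decide (t ≤ j) && decide (j < t + R)) = true := by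
        simp only [Bool.and_eq_true, decide_eq_true_eq]
        omega
      simp [hw, hqt]
    · intro j hcv
      rw [covB_succ] at hcv
      rcases Bool.or_eq_true_iff.mp hcv with hcv | hcv
      · have := hbnd j hcv
        omega
      · simp only [Bool.and_eq_true, decide_eq_true_eq] at hcv
        omega
    · simp only [bodyB, hcount, if_pos hq]
      refine Prod.ext ?_ rfl
      simp only
      -- the marking loop writes ones on [max t e, t+R)
      set a : Nat := max t e.toNat with ha
      have hmax : max (t : Int) e = (a : Int) := by omega
      have hcast : (t : Int) + (R : Int) = ((t + R : Nat) : Int) := by push_cast; ring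
      rw [hmax, hcast]
      simp only [maskAt]
      rw [mark_ones _ cs.length a (t + R) (by omega)]
      apply List.map_congr_left
      intro j hj
      have hjn : j < cs.length := List.mem_range.mp hj
      rw [covB_succ]
      simp only [hqt, Bool.and_true]
      by_cases hw : a ≤ j ∧ j < t + R
      · rw [if_pos hw]
        have : (decide (t ≤ j) && decide (j < t + R)) = true := by
          simp only [Bool.and_eq_true, decide_eq_true_eq]
          omega
        simp [this]
      · rw [if_neg hw]
        by_cases hc : covB cs tc R ((R : Int) - m) t j = true
        · simp [hc]
        · simp only [Bool.not_eq_true] at hc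
          have hnd : (decide (t ≤ j) && decide (j < t + R)) = false := by
            simp only [Bool.and_eq_false_iff, decide_eq_false_iff_not]
            by_cases hj1 : t ≤ j
            · refine Or.inr fun hj2 => ?_
              have hje : (j : Int) < e := by omega
              have := hcov j hj1 hje
              rw [hc] at this
              exact Bool.false_ne_true this
            · exact Or.inl hj1
          simp [hc, hnd]
  · have hqt : qualB cs tc R ((R : Int) - m) t = false := by simp [qualB]; omega
    have hmask : maskAt cs tc R ((R : Int) - m) (t + 1) = maskAt cs tc R ((R : Int) - m) t := by
      simp only [maskAt]
      apply List.map_congr_left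
      intro j hj
      rw [covB_succ]
      simp [hqt]
    refine ⟨e, he0, by push_cast; omega, ?_, ?_, ?_⟩
    · intro j hj1 hj2
      rw [covB_succ]
      have := hcov j (by omega) hj2
      simp [this]
    · intro j hcv
      rw [covB_succ] at hcv
      simp only [hqt, Bool.and_false, Bool.or_false] at hcv
      exact hbnd j hcv
    · simp only [bodyB, hcount, if_neg hq, hmask]

lemma B_loop (cs tc : List Char) (m : Int) (R : Nat) (hR : 1 ≤ R) :
    ∀ t : Nat, t + R ≤ cs.length + 1 →
      ∃ e : Int, 0 ≤ e ∧ e ≤ (t : Int) - 1 + R ∧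
        (∀ j : Nat, t ≤ j → (j : Int) < e → covB cs tc R ((R : Int) - m) t j = true) ∧
        (∀ j : Nat, covB cs tc R ((R : Int) - m) t j = true → (j : Int) < e) ∧
        (PySem.List.pyRange 0 (t : Int) 1).foldl (bodyB cs tc (R : Int) m)
            (maskAt cs tc R ((R : Int) - m) 0, (cntW cs tc R 0 : Int), 0)
          = (maskAt cs tc R ((R : Int) - m) t, (cntW cs tc R (t - 1) : Int), e) := by
  intro t
  induction t with
  | zero =>
      intro _
      refine ⟨0, le_rfl, by push_cast; omega, ?_, ?_, ?_⟩
      · intro j _ hj2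
        omega
      · intro j hcv
        rw [covB_zero] at hcv
        exact absurd hcv Bool.false_ne_true
      · rw [show ((0 : Nat) : Int) = 0 from rfl, PySem.List.pyRange_one_eq_nil le_rfl]
        rfl
  | succ t ih =>
      intro h
      obtain ⟨e, he0, he1, hcov, hbnd, hfold⟩ := ih (by omega)
      obtain ⟨e', h0', h1', hcov', hbnd', hstep⟩ :=
        stepB cs tc m t R hR (by omega) e he0 he1 hcov hbnd
      refine ⟨e', h0', h1', hcov', hbnd', ?_⟩
      have hsplit : PySem.List.pyRange 0 ((t + 1 : Nat) : Int) 1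
          = PySem.List.pyRange 0 (t : Int) 1 ++ [(t : Int)] := by
        push_cast
        exact PySem.List.pyRange_one_succ_right (by positivity)
      rw [hsplit, List.foldl_append, hfold]
      simp only [List.foldl_cons, List.foldl_nil]
      exact hstep

lemma foldl_fixed {alpha beta : Type} (f : alpha → beta → alpha) (x : alpha) (l : List beta)
    (h : ∀ b ∈ l, f x b = x) : l.foldl f x = x := by
  induction l with
  | nil => rfl
  | cons b l ih =>
      simp only [List.foldl_cons, h b (by simp)]
      exact ih (fun b' hb' => h b' (by simp [hb']))

lemma bodyA_degenerate (cs tc : List Char) (r m : Int) (out : List Int) (i : Int)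
    (hi : 0 ≤ i) (hr : r ≤ 0) (hL : out.length ≤ cs.length)
    (hnd : r = 0 ∨ m < r ∨ (cs.length : Int) + r ≤ 0) :
    bodyA cs tc r m out i = out := by
  have hcount : (PySem.List.pyRange i (i + r) 1).foldl
      (fun count j => if [PySem.List.pyGetD cs j ' '] = tc then count + 1 else count) (0 : Int)
      = 0 := by
    rw [PySem.List.pyRange_one_eq_nil (by omega)]
    rfl
  simp only [bodyA, hcount]
  by_cases hm : m < r
  · rw [if_neg (by omega)]
  · have hB : r = 0 ∨ (cs.length : Int) + r ≤ 0 := by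
      rcases hnd with h | h | h
      · exact Or.inl h
      · exact absurd h hm
      · exact Or.inr h
    split_ifs with hcond
    · have hr0 : r.toNat = 0 := by omega
      have hLn : (out.length : Int) ≤ (cs.length : Int) := by exact_mod_cast hL
      have hle : PySem.List.clampIdx out.length (i + r) ≤ PySem.List.clampIdx out.length i := by
        simp only [PySem.List.clampIdx]
        split_ifs <;> omega
      simp only [pyAssignSlice, hr0, List.replicate_zero, List.append_nil]
      rw [Nat.max_eq_left hle]
      exact List.take_append_drop _ out
    · rfl

lemma main_eq (inseq the_char : String) (r m : Int)
    (h1 : 1 ≤ r) (h2 : r ≤ (inseq.toList.length : Int)) :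
    mask_runs inseq the_char r m = mask_runs_alt inseq the_char r m := by
  obtain ⟨R, rfl⟩ : ∃ R : Nat, r = (R : Int) := ⟨r.toNat, (Int.toNat_of_nonneg (by omega)).symm⟩
  have hR1 : 1 ≤ R := by exact_mod_cast h1
  have hRn : R ≤ inseq.toList.length := by exact_mod_cast h2
  rw [mask_runs_eq, mask_runs_alt_eq]
  rw [if_neg (by rw [PySem.List.len_eq]; omega)]
  have hT : PySem.List.len inseq.toList - (R : Int) + 1
      = (((inseq.toList.length - R + 1 : Nat)) : Int) := by
    rw [PySem.List.len_eq]
    push_cast [Nat.cast_sub hRn]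
    omega
  have hc0 : (((PySem.List.slice inseq.toList none (some (R : Int))).countP
        (fun c => decide ([c] = the_char.toList)) : Nat) : Int)
      = ((cntW inseq.toList the_char.toList R 0 : Nat) : Int) := by
    rw [PySem.List.slice_to inseq.toList (by positivity)]
    simp only [cntW, List.drop_zero, Int.toNat_natCast]
    rfl
  rw [hT, hc0]
  have hA := A_loop inseq.toList the_char.toList m R hR1
    (inseq.toList.length - R + 1) (by omega)
  obtain ⟨e, -, -, -, -, hfold⟩ := B_loop inseq.toList the_char.toList m R hR1
    (inseq.toList.length - R + 1) (by omega)
  rw [maskAt_zero] at hA hfold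
  rw [hA, hfold]

lemma len_bodyA_le (cs tc : List Char) (r m : Int) (out : List Int) (i : Int) (hr : r < 0) :
    (bodyA cs tc r m out i).length ≤ out.length := by
  simp only [bodyA]
  split_ifs
  · simp only [pyAssignSlice, List.length_append, List.length_take, List.length_drop,
      List.length_replicate, show r.toNat = 0 from by omega]
    have h1 := PySem.List.clampIdx_le out.length i
    have h2 := PySem.List.clampIdx_le out.length (i + r)
    omega
  · exact le_rfl

lemma len_foldlA_le (cs tc : List Char) (r m : Int) (l : List Int) (hr : r < 0) :
    ∀ out : List Int, (l.foldl (bodyA cs tc r m) out).length ≤ out.length := by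
  induction l with
  | nil => intro out; simp
  | cons b l ih =>
      intro out
      calc ((b :: l).foldl (bodyA cs tc r m) out).length
          = (l.foldl (bodyA cs tc r m) (bodyA cs tc r m out b)).length := by rfl
        _ ≤ (bodyA cs tc r m out b).length := ih _
        _ ≤ out.length := len_bodyA_le cs tc r m out b hr

-- ===== VERDICT (by name: the statement is the Claim_ definition above) =====
theorem mask_runs_spec : Claim_unchanged_mask_runs := by
  unfold Claim_unchanged_mask_runs
  intro inseq the_char r m hdom
  unfold Spec_mask_runs D_mask_runs
  intro hnd
  by_cases h1 : 1 ≤ r ∧ r ≤ (inseq.toList.length : Int)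
  · exact main_eq inseq the_char r m h1.1 h1.2
  · rw [mask_runs_eq, mask_runs_alt_eq]
    by_cases hr : r ≤ 0
    · rw [if_pos (Or.inl hr)]
      apply foldl_fixed
      intro i hi
      have hi0 : 0 ≤ i := (PySem.List.mem_pyRange_one.mp hi).1
      apply bodyA_degenerate inseq.toList the_char.toList r m _ i hi0 hr (by simp)
      omega
    · rw [if_pos (Or.inr (by rw [PySem.List.len_eq]; omega))]
      rw [PySem.List.pyRange_one_eq_nil (by rw [PySem.List.len_eq]; omega)]
      rfl
theorem mask_runs_changed : Claim_changed_mask_runs := by unfold Claim_changed_mask_runs; decide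
theorem mask_runs_tight : Claim_exact_mask_runs := by
  unfold Claim_exact_mask_runs
  intro inseq the_char r m hdom hD
  obtain ⟨hr, hm, hn⟩ := hD
  rw [mask_runs_eq, mask_runs_alt_eq, if_pos (Or.inl (by omega))]
  intro hEq
  have hcons : PySem.List.pyRange 0 (PySem.List.len inseq.toList - r + 1) 1
      = 0 :: PySem.List.pyRange 1 (PySem.List.len inseq.toList - r + 1) 1 := by
    rw [PySem.List.len_eq]
    exact PySem.List.pyRange_one_cons (by omega)
  have hfirst : bodyA inseq.toList the_char.toList r m (List.replicate inseq.toList.length 0) 0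
      = (List.replicate inseq.toList.length (0 : Int)).drop
          ((inseq.toList.length : Int) + r).toNat := by
    have hcount : (PySem.List.pyRange 0 (0 + r) 1).foldl
        (fun count j =>
          if [PySem.List.pyGetD inseq.toList j ' '] = the_char.toList then count + 1 else count)
        (0 : Int) = 0 := by
      rw [PySem.List.pyRange_one_eq_nil (by omega)]
      rfl
    simp only [bodyA, hcount, if_pos (by omega : r - m ≤ (0 : Int))]
    simp only [pyAssignSlice, show r.toNat = 0 from by omega, List.replicate_zero,
      List.append_nil, List.length_replicate]
    have hc1 : PySem.List.clampIdx inseq.toList.length (0 : Int) = 0 := by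
      simp [PySem.List.clampIdx]
    have hc2 : PySem.List.clampIdx inseq.toList.length (0 + r)
        = ((inseq.toList.length : Int) + r).toNat := by
      simp only [PySem.List.clampIdx]
      split_ifs <;> omega
    rw [hc1, hc2, Nat.max_eq_right (Nat.zero_le _), List.take_zero, List.nil_append]
  have hlen := congrArg List.length hEq
  rw [hcons] at hlen
  simp only [List.foldl_cons, hfirst] at hlen
  have hA := len_foldlA_le inseq.toList the_char.toList r m
    (PySem.List.pyRange 1 (PySem.List.len inseq.toList - r + 1) 1) hr
    ((List.replicate inseq.toList.length (0 : Int)).drop ((inseq.toList.length : Int) + r).toNat)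
  rw [hlen] at hA
  simp only [List.length_drop, List.length_replicate] at hA
  omega
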